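-- pv_equiv track=rewrite | github.com/varunvarunTM/Python | IIT-Madras-Datascience/Week 6/Mock/Q3.py | group_by_city
-- ===== SOURCE A (Python) =====
-- def group_by_city(scores_dataset):
--     """
--     Group students by cities
--
--     Argument:
--         scores_dataset: list of dicts
--     Return:
--         cities: dict: (key: string, value: list of strings)
--     """
--     cities = {}
--     for data in scores_dataset:
--         city = data['City']
--         name = data['Name']
--         if city in cities:
--             cities[city].append(name)
--         else:
--             cities[city] = [name]
--     return cities
-- ===== SOURCE B (Python) =====
-- def group_by_city(scores_dataset):
--     # Two-pass grouping: extract (city, name) pairs, list the distinct cities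
--     # in first-appearance order, then build each city's name list by a scan.
--     pairs = [(data['City'], data['Name']) for data in scores_dataset]
--     keys = list(dict.fromkeys(city for city, _ in pairs))
--     return {city: [name for c, name in pairs if c == city] for city in keys}
-- ===== Notes on version B (the rewrite author's own statement) =====
-- stated objective: alternative
-- what changed: Replaces the single-pass running-dict insert/append loop by two passes: extract (city,name) pairs, dedup the cities in first-appearance order, then build each city's name list with a comprehension scan per city.
import Mathlib
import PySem

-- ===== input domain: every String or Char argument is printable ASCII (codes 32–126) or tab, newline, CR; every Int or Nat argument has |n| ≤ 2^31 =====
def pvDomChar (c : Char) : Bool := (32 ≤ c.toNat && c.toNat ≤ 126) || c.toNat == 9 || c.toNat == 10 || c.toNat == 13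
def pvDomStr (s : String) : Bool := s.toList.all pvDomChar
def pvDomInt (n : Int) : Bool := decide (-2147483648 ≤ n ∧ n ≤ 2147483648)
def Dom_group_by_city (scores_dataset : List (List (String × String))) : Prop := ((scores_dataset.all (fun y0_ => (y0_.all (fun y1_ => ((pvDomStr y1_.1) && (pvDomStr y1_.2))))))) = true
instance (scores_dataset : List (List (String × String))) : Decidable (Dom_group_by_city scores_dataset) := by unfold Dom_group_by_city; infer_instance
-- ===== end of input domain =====

-- B replaces A's running-dict insert/append loop by pair extraction, an ordered dedup of the
-- cities and one filtering scan per city (objective: alternative; same return value on Pre_).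


-- ===== PORT A =====
-- data['City'] on a record (a Python dict, here an association list): first-match lookup;
-- Pre_ excludes records missing a key, so the default "" is never the result there.
def pvLook (data : List (String × String)) (k : String) : Option String :=
  PySem.Dict.get? (PySem.Dict.mk data) k

def group_by_city (scores_dataset : List (List (String × String))) : List (String × List String) :=
  (scores_dataset.foldl
    (fun cities data =>
      let city := (pvLook data "City").getD ""
      let name := (pvLook data "Name").getD ""
      if cities.contains city then cities.modify city [] (fun l => l ++ [name])
      else cities.insert city [name])
    (PySem.Dict.empty : PySem.Dict String (List String))).items

-- ===== PORT B =====
def group_by_city_alt (scores_dataset : List (List (String × String))) : List (String × List String) :=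
  let pairs := scores_dataset.map
    (fun data => ((pvLook data "City").getD "", (pvLook data "Name").getD ""))
  let keys := PySem.List.dedup (pairs.map Prod.fst)
  keys.map (fun city => (city, (pairs.filter (fun p => p.1 == city)).map Prod.snd))

-- ===== PRECONDITION & SPEC =====
-- Pre_: every record has both keys; on a record missing 'City' or 'Name' the Python A (and B) raise KeyError.
def Pre_group_by_city (scores_dataset : List (List (String × String))) : Prop :=
  ∀ data ∈ scores_dataset, (pvLook data "City").isSome ∧ (pvLook data "Name").isSome
instance (scores_dataset : List (List (String × String))) : Decidable (Pre_group_by_city scores_dataset) := by unfold Pre_group_by_city; infer_instance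

def pvWitness_group_by_city : (List (List (String × String))) :=
  [[("City", "Madrid"), ("Name", "Ana")], [("City", "Pune"), ("Name", "Raj")], [("City", "Madrid"), ("Name", "Li")]]

def Spec_group_by_city (scores_dataset : List (List (String × String))) (out : List (String × List String)) : Prop := out = group_by_city_alt scores_dataset
instance (scores_dataset : List (List (String × String))) (out : List (String × List String)) : Decidable (Spec_group_by_city scores_dataset out) := by unfold Spec_group_by_city; infer_instance

-- ===== CLAIM (what is proved, stated in full; the proofs are below) =====
def Claim_equal_group_by_city : Prop := ∀ (scores_dataset : List (List (String × String))), Dom_group_by_city scores_dataset → Pre_group_by_city scores_dataset → Spec_group_by_city scores_dataset (group_by_city scores_dataset)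

-- ===== LEMMAS AND PROOFS =====

-- A's guarded branch is exactly a Dict.modify step (both branches are insert at the same key).
theorem pv_step_eq (d : PySem.Dict String (List String)) (c n : String) :
    (if d.contains c then d.modify c [] (fun l => l ++ [n]) else d.insert c [n])
      = d.modify c [] (fun l => l ++ [n]) := by
  by_cases h : d.contains c = true
  · simp [h]
  · have hg : d.getD c [] = [] := PySem.Dict.getD_of_not_contains d [] (by simpa using h)
    have : d.modify c [] (fun l => l ++ [n]) = d.insert c ((d.getD c []) ++ [n]) := rfl
    simp [h, this, hg]

-- A dict with Nodup keys is the map of (key, its value) over its keys.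
theorem pv_items_eq_map_keys (d : PySem.Dict String (List String)) (h : d.keys.Nodup) :
    d.items = d.keys.map (fun c => (c, d.getD c [])) := by
  have : d.keys.map (fun c => (c, d.getD c [])) = d.items.map (fun p => (p.1, d.getD p.1 [])) := by
    simp [PySem.Dict.keys, List.map_map, Function.comp]
  rw [this, List.map_congr_left, List.map_id]
  intro p hp
  have := PySem.Dict.getD_of_mem_items (d := d) (k := p.1) (v := p.2) (by simpa using hp) h ([])
  simp [this]

theorem pv_main (scores_dataset : List (List (String × String))) :
    group_by_city scores_dataset = group_by_city_alt scores_dataset := by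
  unfold group_by_city group_by_city_alt
  set pairs := scores_dataset.map
    (fun data => ((pvLook data "City").getD "", (pvLook data "Name").getD "")) with hpairs
  -- rewrite A's fold over records as a fold over the extracted pairs, step = modify
  have hfold :
      scores_dataset.foldl
        (fun cities data =>
          let city := (pvLook data "City").getD ""
          let name := (pvLook data "Name").getD ""
          if cities.contains city then cities.modify city [] (fun l => l ++ [name])
          else cities.insert city [name])
        (PySem.Dict.empty : PySem.Dict String (List String))
        = pairs.foldl (fun d p => d.modify p.1 [] (fun l => l ++ [p.2])) PySem.Dict.empty := by
    rw [hpairs, List.foldl_map]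
    exact PySem.List.foldl_congr_mem _ _ _ _ (fun d x _ => pv_step_eq d ((pvLook x "City").getD "") ((pvLook x "Name").getD ""))
  rw [hfold]
  set D := pairs.foldl (fun d p => d.modify p.1 [] (fun l => l ++ [p.2]))
    (PySem.Dict.empty : PySem.Dict String (List String)) with hD
  have hkeys : D.keys = PySem.List.dedup (pairs.map Prod.fst) := by
    rw [hD]
    have := PySem.Dict.keys_foldl_modify_key (l := pairs) (key := Prod.fst) (d0 := ([] : List String))
      (f := fun d p l => l ++ [p.2]) (d := (PySem.Dict.empty : PySem.Dict String (List String)))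
    simpa [PySem.Dict.keys_empty, PySem.Set.update, PySem.List.dedup_eq_ofList, PySem.Set.ofList_eq_foldl] using this
  have hnodup : D.keys.Nodup := by
    rw [hkeys]; exact PySem.List.nodup_dedup _
  have hget : ∀ c, D.getD c [] = (pairs.filter (fun p => p.1 == c)).map Prod.snd := by
    intro c
    rw [hD]
    simpa using PySem.Dict.getD_foldl_modify_append (l := pairs)
      (d := (PySem.Dict.empty : PySem.Dict String (List String))) (c := c)
  rw [pv_items_eq_map_keys D hnodup, hkeys]
  refine List.map_congr_left (fun c _ => ?_)
  rw [hget c]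

-- ===== VERDICT (by name: the statement is the Claim_ definition above) =====
theorem group_by_city_spec : Claim_equal_group_by_city := by
  intro ds _ _
  unfold Spec_group_by_city
  exact pv_main ds
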